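-- pv_equiv track=rewrite | github.com/job4sergey/algo_workout | informatics_msk_ru/ds_algs_course/stack/the_111648_Balls/MccSolution.py | solution
-- ===== SOURCE A (Python) =====
-- def reduce_top(st):
--     if not st:
--         return 0
--
--     if st and st[-1][1] > 2:
--         res = st[-1][1]
--         st.pop()
--         return res
--
--     return 0
--
-- def solution(balls):
--     st = []
--     res = 0
--
--     for b in balls:
--         if not st:
--             st.append([b, 1])
--             continue
--
--         if st[-1][0] == b:
--             st[-1][1] += 1
--         else:
--             res += reduce_top(st)
--             if not st:
--                 st.append([b, 1])
--                 continue
--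
--             if st[-1][0] == b:
--                 st[-1][1] += 1
--             else:
--                 st.append([b, 1])
--
--     res += reduce_top(st)
--     st.clear()
--     return res
-- ===== SOURCE B (Python) =====
-- def _runs(balls):
--     out = []
--     cur = None
--     cnt = 0
--     for b in balls:
--         if cnt and cur == b:
--             cnt += 1
--         else:
--             if cnt:
--                 out.append((cur, cnt))
--             cur, cnt = b, 1
--     if cnt:
--         out.append((cur, cnt))
--     return out
--
-- def solution(balls):
--     st = []
--     res = 0
--     for b, c in _runs(balls):
--         if st and st[-1][0] != b and st[-1][1] > 2:
--             res += st[-1][1]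
--             st.pop()
--         if st and st[-1][0] == b:
--             st[-1][1] += c
--         else:
--             st.append([b, c])
--     if st and st[-1][1] > 2:
--         res += st[-1][1]
--     return res
-- ===== Notes on version B (the rewrite author's own statement) =====
-- stated objective: alternative
-- what changed: A does one interleaved per-ball pass mutating a stack with a reduce-top helper at every boundary; B first compresses the input into maximal (ball, count) runs and then collapses that run list in a second pass, doing at most one lazy removal and one merge-or-push per run.
import Mathlib
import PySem

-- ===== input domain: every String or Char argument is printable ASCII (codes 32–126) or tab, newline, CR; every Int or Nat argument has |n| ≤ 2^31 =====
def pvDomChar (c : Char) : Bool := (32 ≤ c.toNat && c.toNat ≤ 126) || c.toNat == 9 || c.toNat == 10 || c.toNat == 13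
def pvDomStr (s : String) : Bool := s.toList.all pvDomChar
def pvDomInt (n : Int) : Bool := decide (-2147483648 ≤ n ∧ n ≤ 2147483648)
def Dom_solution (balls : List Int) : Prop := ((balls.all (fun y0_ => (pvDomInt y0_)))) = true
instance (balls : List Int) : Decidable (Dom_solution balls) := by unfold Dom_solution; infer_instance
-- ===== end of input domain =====

-- B replaces A's interleaved per-ball stack pass by a run-building pass plus a run-level collapse pass (alternative decomposition; return value only).


-- ===== PORT A =====
-- stack is a Lean list with its head = Python's st[-1]; reduce_top returns (gain, new stack) instead of mutating
def reduceTop : List (Int × Int) → Int × List (Int × Int)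
  | [] => (0, [])
  | (tb, tc) :: rest => if tc > 2 then (tc, rest) else (0, (tb, tc) :: rest)

def stepA : (List (Int × Int) × Int) → Int → (List (Int × Int) × Int)
  | ([], res), b => ([(b, 1)], res)
  | ((tb, tc) :: rest, res), b =>
    if tb = b then ((tb, tc + 1) :: rest, res)
    else
      let r := reduceTop ((tb, tc) :: rest)
      let res := res + r.1
      match r.2 with
      | [] => ([(b, 1)], res)
      | (tb', tc') :: rest' =>
        if tb' = b then ((tb', tc' + 1) :: rest', res) else ((b, 1) :: (tb', tc') :: rest', res)

def solution (balls : List Int) : Int :=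
  let s := balls.foldl stepA ([], 0)
  s.2 + (reduceTop s.1).1

-- ===== PORT B =====
-- first pass: maximal runs as (ball, count) pairs, built as in Source B with a pending (cur, cnt)
def runsStep : (List (Int × Int) × Option (Int × Int)) → Int → (List (Int × Int) × Option (Int × Int))
  | (out, some (cur, cnt)), b =>
      if cur = b then (out, some (cur, cnt + 1)) else (out ++ [(cur, cnt)], some (b, 1))
  | (out, none), b => (out, some (b, 1))

def runs (balls : List Int) : List (Int × Int) :=
  let s := balls.foldl runsStep ([], none)
  match s.2 with
  | some p => s.1 ++ [p]
  | none => s.1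

-- second pass: collapse the run list on a stack of (ball, count) with distinct adjacent balls.
-- Source B's first if-block of the loop body (lazy removal of a big group):
def reduceB : (List (Int × Int) × Int) → Int → (List (Int × Int) × Int)
  | ((tb, tc) :: rest, res), b => if tb ≠ b ∧ tc > 2 then (rest, res + tc) else ((tb, tc) :: rest, res)
  | ([], res), _ => ([], res)

-- Source B's second if-block (merge the run into an equal top, else push it):
def pushMerge : (List (Int × Int) × Int) → (Int × Int) → (List (Int × Int) × Int)
  | ((tb, tc) :: rest, res), (b, c) =>
      if tb = b then ((tb, tc + c) :: rest, res) else ((b, c) :: (tb, tc) :: rest, res)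
  | ([], res), (b, c) => ([(b, c)], res)

def stepB (s : List (Int × Int) × Int) (r : Int × Int) : List (Int × Int) × Int :=
  pushMerge (reduceB s r.1) r

def solution_alt (balls : List Int) : Int :=
  let s := (runs balls).foldl stepB ([], 0)
  match s.1 with
  | (_, tc) :: _ => if tc > 2 then s.2 + tc else s.2
  | [] => s.2

-- ===== PRECONDITION & SPEC =====
def Spec_solution (balls : List Int) (out : Int) : Prop := out = solution_alt balls
instance (balls : List Int) (out : Int) : Decidable (Spec_solution balls out) := by unfold Spec_solution; infer_instance

-- ===== CLAIM (what is proved, stated in full; the proofs are below) =====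
def Claim_equal_solution : Prop := ∀ (balls : List Int), Dom_solution balls → Spec_solution balls (solution balls)

-- ===== LEMMAS AND PROOFS =====

-- front-recursive characterisation of the run builder, used only by the proofs
def runsAux (b : Int) (c : Int) : List Int → List (Int × Int)
  | [] => [(b, c)]
  | x :: xs => if b = x then runsAux b (c + 1) xs else (b, c) :: runsAux x 1 xs

-- the final flush applied to a state
def fin : List (Int × Int) × Int → Int
  | ((_, tc) :: _, res) => if tc > 2 then res + tc else res
  | ([], res) => res

-- invariant of the stack below A's pending top: adjacent balls distinct, all counts ≤ 2
def AdjNe : List (Int × Int) → Prop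
  | [] => True
  | [_] => True
  | p :: q :: rest => p.1 ≠ q.1 ∧ AdjNe (q :: rest)

def Good (st : List (Int × Int)) : Prop :=
  AdjNe st ∧ ∀ p ∈ st, p.2 ≤ 2

theorem runs_foldl_eq (xs : List Int) : ∀ (out : List (Int × Int)) (b c : Int),
    (match (xs.foldl runsStep (out, some (b, c))).2 with
      | some p => (xs.foldl runsStep (out, some (b, c))).1 ++ [p]
      | none => (xs.foldl runsStep (out, some (b, c))).1) = out ++ runsAux b c xs := by
  induction xs with
  | nil => intro out b c; simp [runsAux]
  | cons x xs ih =>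
    intro out b c
    by_cases h : b = x
    · subst h; simp [List.foldl_cons, runsStep, runsAux, ih]
    · simp [List.foldl_cons, runsStep, runsAux, h, ih]

theorem runs_eq_runsAux (x : Int) (xs : List Int) : runs (x :: xs) = runsAux x 1 xs := by
  have := runs_foldl_eq xs [] x 1
  simpa [runs, runsStep] using this

theorem runsAux_shape (xs : List Int) : ∀ b c, ∃ c' rs, runsAux b c xs = (b, c') :: rs := by
  induction xs with
  | nil => intro b c; exact ⟨c, [], rfl⟩
  | cons x xs ih =>
    intro b c
    by_cases h : b = x
    · subst h; simpa [runsAux] using ih b (c + 1)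
    · exact ⟨c, runsAux x 1 xs, by simp [runsAux, h]⟩

theorem stepB_push (st : List (Int × Int)) (res b c : Int)
    (hG : ∀ p ∈ st, p.2 ≤ 2) (hne : ∀ p ∈ st.head?, p.1 ≠ b) :
    stepB (st, res) (b, c) = ((b, c) :: st, res) := by
  cases st with
  | nil => simp [stepB, reduceB, pushMerge]
  | cons t rest =>
    obtain ⟨tb, tc⟩ := t
    have h1 : tc ≤ 2 := hG (tb, tc) (by simp)
    have h2 : tb ≠ b := hne (tb, tc) (by simp)
    have h3 : ¬ tc > 2 := by omega
    simp [stepB, reduceB, pushMerge, h2, h3]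

theorem stepB_merge (st : List (Int × Int)) (res b d c : Int) :
    stepB ((b, d) :: st, res) (b, c) = ((b, d + c) :: st, res) := by
  simp [stepB, reduceB, pushMerge]

-- popping a big top before the run is absorbed into stepB's own lazy removal
theorem stepB_reduceFirst (st : List (Int × Int)) (res tb tc b c : Int)
    (hne : tb ≠ b) (hgt : tc > 2) (hst : ∀ p ∈ st.head?, p.1 = b ∨ p.2 ≤ 2) :
    stepB ((tb, tc) :: st, res) (b, c) = stepB (st, res + tc) (b, c) := by
  cases st with
  | nil => simp [stepB, reduceB, hne, hgt]
  | cons t rest =>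
    obtain ⟨tb', tc'⟩ := t
    have h' : ¬ (tb' ≠ b ∧ tc' > 2) := by
      rcases hst (tb', tc') (by simp) with h | h
      · exact fun hc => hc.1 h
      · intro hc; omega
    simp [stepB, reduceB, hne, hgt, h']

-- merging a pending run into an equal stack top commutes with starting the run count higher
theorem mergePending (xs : List Int) : ∀ (b c d : Int) (st : List (Int × Int)) (res : Int),
    (∀ p ∈ st, p.2 ≤ 2) → (∀ p ∈ st.head?, p.1 ≠ b) →
    List.foldl stepB ((b, d) :: st, res) (runsAux b c xs)
      = List.foldl stepB (st, res) (runsAux b (d + c) xs) := by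
  induction xs with
  | nil =>
    intro b c d st res hG hne
    simp [runsAux, stepB_merge, stepB_push st res b (d + c) hG hne]
  | cons y ys ih =>
    intro b c d st res hG hne
    by_cases h : b = y
    · subst h
      simp only [runsAux, if_true]
      rw [ih b (c + 1) d st res hG hne, add_assoc]
    · simp only [runsAux, if_neg h, List.foldl_cons,
        stepB_merge, stepB_push st res b (d + c) hG hne]

-- core invariant: A with pending top (b, c) over stack st matches B consuming runsAux b c
theorem core (xs : List Int) : ∀ (b c : Int) (st : List (Int × Int)) (res : Int),
    Good st → (∀ p ∈ st.head?, p.1 ≠ b) →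
    fin (List.foldl stepA ((b, c) :: st, res) xs)
      = fin (List.foldl stepB (st, res) (runsAux b c xs)) := by
  induction xs with
  | nil =>
    intro b c st res hG hne
    simp [runsAux, stepB_push st res b c hG.2 hne]
  | cons x xs ih =>
    intro b c st res hG hne
    by_cases hbx : b = x
    · subst hbx
      simp only [runsAux, if_true, List.foldl_cons, stepA, if_pos rfl]
      exact ih b (c + 1) st res hG hne
    · simp only [runsAux, if_neg hbx, List.foldl_cons]
      rw [stepB_push st res b c hG.2 hne]
      obtain ⟨c1, rs, hrx⟩ := runsAux_shape xs x 1
      by_cases hc : c > 2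
      · -- A pops the big pending (b, c) before handling x
        cases st with
        | nil =>
          simp only [stepA, if_neg hbx, reduceTop, if_pos hc]
          rw [hrx, List.foldl_cons,
            stepB_reduceFirst [] res b c x c1 hbx hc (by simp),
            ← List.foldl_cons, ← hrx]
          exact ih x 1 [] (res + c) ⟨trivial, by simp⟩ (by simp)
        | cons t rest =>
          obtain ⟨tb', tc'⟩ := t
          have htb' : tb' ≠ b := hne (tb', tc') (by simp)
          have htc' : tc' ≤ 2 := hG.2 (tb', tc') (by simp)
          have hGr : Good rest := by
            refine ⟨?_, fun p hp => hG.2 p (by simp [hp])⟩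
            cases rest with
            | nil => trivial
            | cons q qs => exact hG.1.2
          have hner : ∀ p ∈ rest.head?, p.1 ≠ tb' := by
            intro p hp
            cases rest with
            | nil => simp at hp
            | cons q qs =>
              simp only [List.head?_cons, Option.mem_some_iff] at hp
              subst hp
              exact hG.1.1.symm
          by_cases hx : tb' = x
          · -- revealed top equals the new ball: A merges, B merges via mergePending
            subst hx
            simp only [stepA, if_neg hbx, reduceTop, if_pos hc, if_true]
            rw [hrx, List.foldl_cons,
              stepB_reduceFirst ((tb', tc') :: rest) res b c tb' c1 (Ne.symm (fun h => hbx h.symm)) hc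
                (by intro p hp; simp at hp; subst hp; exact Or.inl rfl)]
            rw [← List.foldl_cons, ← hrx,
              mergePending xs tb' 1 tc' rest (res + c) hGr.2 hner]
            exact ih tb' (tc' + 1) rest (res + c) hGr hner
          · -- revealed top differs: A pushes (x, 1)
            simp only [stepA, if_neg hbx, reduceTop, if_pos hc, if_neg hx]
            rw [hrx, List.foldl_cons,
              stepB_reduceFirst ((tb', tc') :: rest) res b c x c1 hbx hc
                (by intro p hp; simp at hp; subst hp; exact Or.inr htc')]
            have hG' : Good ((tb', tc') :: rest) := hG
            have := ih x 1 ((tb', tc') :: rest) (res + c)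
              hG' (by intro p hp; simp at hp; subst hp; exact hx)
            rw [hrx, List.foldl_cons] at this
            simpa using this
      · -- c ≤ 2: A keeps (b, c) and pushes (x, 1) on top of it
        simp only [stepA, if_neg hbx, reduceTop, if_neg hc]
        have hG' : Good ((b, c) :: st) := by
          constructor
          · cases st with
            | nil => trivial
            | cons q qs => exact ⟨Ne.symm (hne q (by simp)), hG.1⟩
          · intro p hp
            rcases List.mem_cons.mp hp with h | h
            · subst h; omega
            · exact hG.2 p h
        have := ih x 1 ((b, c) :: st) res hG'
          (by intro p hp; simp at hp; subst hp; exact hbx)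
        simpa using this

theorem finA_eq (st : List (Int × Int)) (res : Int) :
    res + (reduceTop st).1 = fin (st, res) := by
  cases st with
  | nil => simp [reduceTop, fin]
  | cons t rest =>
    obtain ⟨tb, tc⟩ := t
    by_cases h : tc > 2 <;> simp [reduceTop, fin, h]

-- ===== VERDICT (by name: the statement is the Claim_ definition above) =====
theorem solution_spec : Claim_equal_solution := by
  unfold Claim_equal_solution
  intro balls _
  unfold Spec_solution
  cases balls with
  | nil => simp [solution, solution_alt, runs, reduceTop]
  | cons x xs =>
    have h := core xs x 1 [] 0 ⟨trivial, by simp⟩ (by simp)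
    show (let s := (x :: xs).foldl stepA ([], 0); s.2 + (reduceTop s.1).1) = _
    rw [show (x :: xs).foldl stepA ([], 0) = xs.foldl stepA ([(x, 1)], 0) from rfl]
    rw [finA_eq, h]
    unfold solution_alt
    rw [runs_eq_runsAux]
    obtain ⟨st', res'⟩ := (runsAux x 1 xs).foldl stepB ([], 0)
    cases st' with
    | nil => simp [fin]
    | cons t rest => obtain ⟨tb, tc⟩ := t; simp [fin]
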